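-- pv_equiv track=rewrite | github.com/manmuqingshan/trail-mate | platform/nrf52/arduino_common/tools/gen_scaled_fusion_pixel_font.py | upscale_glyph
-- ===== SOURCE A (Python) =====
-- def upscale_glyph(rows8: list[int], dest_size: int = 10) -> list[int]:
--     rows10: list[int] = []
--     for y in range(dest_size):
--         src_y = min(7, (y * 8) // dest_size)
--         src_row = rows8[src_y]
--         dest_row = 0
--         for x in range(dest_size):
--             src_x = min(7, (x * 8) // dest_size)
--             bit = (src_row >> (7 - src_x)) & 0x01
--             if bit:
--                 dest_row |= 1 << (15 - x)
--         rows10.append(dest_row)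
--     return rows10
-- ===== SOURCE B (Python) =====
-- def upscale_glyph(rows8: list[int], dest_size: int = 10) -> list[int]:
--     # Precompute, per source column s, the OR-mask of destination bits it expands to.
--     colmask = [0] * 8
--     for x in range(dest_size):
--         s = min(7, (x * 8) // dest_size)
--         colmask[s] |= 1 << (15 - x)
--     out: list[int] = []
--     for y in range(dest_size):
--         src_row = rows8[min(7, (y * 8) // dest_size)]
--         dest_row = 0
--         for s in range(8):
--             if (src_row >> (7 - s)) & 1:
--                 dest_row |= colmask[s]
--         out.append(dest_row)
--     return out
-- ===== Notes on version B (the rewrite author's own statement) =====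
-- stated objective: alternative
-- what changed: B precomputes an 8-entry table colmask[s] of the OR of destination bits each source column expands to, then builds every destination row by a fixed scan of the 8 source columns, instead of A's per-destination-pixel re-sampling of min(7,(x*8)//dest_size) in a nested dest_size x dest_size loop.
import Mathlib
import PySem

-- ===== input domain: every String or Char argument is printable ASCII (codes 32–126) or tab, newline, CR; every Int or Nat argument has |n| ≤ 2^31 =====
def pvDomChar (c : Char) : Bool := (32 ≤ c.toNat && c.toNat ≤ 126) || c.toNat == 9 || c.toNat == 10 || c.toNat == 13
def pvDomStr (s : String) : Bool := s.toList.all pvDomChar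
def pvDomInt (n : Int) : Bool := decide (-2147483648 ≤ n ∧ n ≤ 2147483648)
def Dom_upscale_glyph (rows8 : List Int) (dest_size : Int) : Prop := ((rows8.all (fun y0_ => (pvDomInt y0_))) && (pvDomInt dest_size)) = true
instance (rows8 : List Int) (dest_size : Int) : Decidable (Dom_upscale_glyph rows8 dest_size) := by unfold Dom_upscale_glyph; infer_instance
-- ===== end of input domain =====

-- B replaces per-destination-pixel column sampling by a precomputed per-source-column
-- destination-bit mask table (an alternative decomposition; same output bit-for-bit).

-- ===== PORT A =====
-- min(7, (x * 8) // dest_size) — appears verbatim in both Pythons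
def srcIdx (dest_size x : Int) : Int := min 7 (PySem.Int.floordiv (x * 8) dest_size)
-- Python's 'n >> k' for k : Nat (arithmetic shift; exact)
def pyShr (a : Int) (k : Nat) : Int := a >>> k

def upscale_glyph (rows8 : List Int) (dest_size : Int) : List Int :=
  (PySem.List.pyRange 0 dest_size 1).foldl (fun rows10 y =>
    let src_y := srcIdx dest_size y
    -- rows8[src_y]: Python IndexError excluded by Pre_
    let src_row := (PySem.List.pyGet? rows8 src_y).getD 0
    let dest_row := (PySem.List.pyRange 0 dest_size 1).foldl (fun dest_row x =>
      let src_x := srcIdx dest_size x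
      -- (7 - src_x) ≥ 0 always (src_x ≤ 7); (15 - x) < 0 (Python ValueError) excluded by Pre_
      let bit := PySem.Int.band (pyShr src_row (7 - src_x).toNat) 1
      if bit ≠ 0 then PySem.Int.bor dest_row ((1 : Int) <<< (15 - x).toNat) else dest_row) 0
    rows10 ++ [dest_row]) []

-- ===== PORT B =====
def upscale_glyph_alt (rows8 : List Int) (dest_size : Int) : List Int :=
  -- colmask[s] = OR of the destination bits source column s expands to
  let colmask := (PySem.List.pyRange 0 dest_size 1).foldl (fun c x =>
    let s := srcIdx dest_size x
    -- s ∈ [0,7] whenever the loop body runs, so .toNat indexing is exact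
    c.set s.toNat (PySem.Int.bor (c.getD s.toNat 0) ((1 : Int) <<< (15 - x).toNat)))
    (List.replicate 8 0)
  (PySem.List.pyRange 0 dest_size 1).foldl (fun out y =>
    let src_row := (PySem.List.pyGet? rows8 (srcIdx dest_size y)).getD 0
    let dest_row := (PySem.List.pyRange 0 8 1).foldl (fun d s =>
      if PySem.Int.band (pyShr src_row (7 - s).toNat) 1 ≠ 0 then
        PySem.Int.bor d (colmask.getD s.toNat 0)
      else d) 0
    out ++ [dest_row]) []

-- ===== PRECONDITION & SPEC =====
-- Pre_ excludes dest_size > 16 (where A's guarded '1 << (15-x)' raises ValueError unless every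
-- sampled source row happens to have the reached bits clear, so A only accidentally returns,
-- while B's unconditional mask precomputation raises) and inputs where rows8 is too short
-- for the sampled source indices (Python IndexError in both programs).
def Pre_upscale_glyph (rows8 : List Int) (dest_size : Int) : Prop :=
  dest_size ≤ 16 ∧ (0 < dest_size → srcIdx dest_size (dest_size - 1) < (rows8.length : Int))
instance (rows8 : List Int) (dest_size : Int) : Decidable (Pre_upscale_glyph rows8 dest_size) := by
  unfold Pre_upscale_glyph; infer_instance

def pvWitness_upscale_glyph : List Int × Int := ([129, 66, 36, 24, 24, 36, 66, 129], 10)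

def Spec_upscale_glyph (rows8 : List Int) (dest_size : Int) (out : List Int) : Prop := out = upscale_glyph_alt rows8 dest_size
instance (rows8 : List Int) (dest_size : Int) (out : List Int) : Decidable (Spec_upscale_glyph rows8 dest_size out) := by unfold Spec_upscale_glyph; infer_instance

-- ===== CLAIM (what is proved, stated in full; the proofs are below) =====
def Claim_equal_upscale_glyph : Prop := ∀ (rows8 : List Int) (dest_size : Int), Dom_upscale_glyph rows8 dest_size → Pre_upscale_glyph rows8 dest_size → Spec_upscale_glyph rows8 dest_size (upscale_glyph rows8 dest_size)

-- ===== LEMMAS AND PROOFS =====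

-- Nat-side mirrors of the two inner computations (all OR-accumulators are nonnegative,
-- so both Int folds are casts of these Nat folds, where ||| is associative/commutative).
def castL (c : List Nat) : List Int := c.map (fun n : Nat => (n : Int))

def maskN (x : Int) : Nat := 1 <<< (15 - x).toNat

def rowAN (P : Int → Prop) [DecidablePred P] (dest : Int) (xs : List Int) (a : Nat) : Nat :=
  xs.foldl (fun d x => if P (srcIdx dest x) then d ||| maskN x else d) a

def rowBN (P : Int → Prop) [DecidablePred P] (c : List Nat) : Nat :=
  (PySem.List.pyRange 0 8 1).foldl (fun d s => if P s then d ||| c.getD s.toNat 0 else d) 0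

def buildN (dest : Int) (c : List Nat) (xs : List Int) : List Nat :=
  xs.foldl (fun c x => c.set (srcIdx dest x).toNat (c.getD (srcIdx dest x).toNat 0 ||| maskN x)) c

theorem getD_castL (c : List Nat) (k : Nat) :
    (castL c).getD k 0 = ((c.getD k 0 : Nat) : Int) := by
  induction c generalizing k with
  | nil => simp [castL, List.getD]
  | cons h t ih => cases k with
    | zero => simp [castL, List.getD]
    | succ k => simpa [castL, List.getD] using ih k

theorem set_castL (c : List Nat) (k v : Nat) :
    (castL c).set k ((v : Nat) : Int) = castL (c.set k v) := by
  induction c generalizing k with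
  | nil => simp [castL]
  | cons h t ih => cases k with
    | zero => simp [castL]
    | succ k => simp [castL]

theorem getD_replicate_zero (n k : Nat) : (List.replicate n (0 : Nat)).getD k 0 = 0 := by
  induction n generalizing k with
  | zero => simp [List.getD]
  | succ n ih => cases k with
    | zero => simp [List.getD]
    | succ k => simp [List.getD]

theorem one_shiftLeft_cast (k : Nat) : ((1 : Int) <<< k) = (((1 <<< k : Nat) : Int)) :=
  Int.mem_toNat?.mp rfl

theorem foldl_lor_pull (P : Int → Prop) [DecidablePred P] (f : Int → Nat) :
    ∀ (l : List Int) (a b : Nat),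
      l.foldl (fun d s => if P s then d ||| f s else d) (a ||| b)
        = a ||| l.foldl (fun d s => if P s then d ||| f s else d) b := by
  intro l
  induction l with
  | nil => intro a b; rfl
  | cons s t ih =>
    intro a b
    by_cases h : P s
    · simp only [List.foldl_cons, if_pos h, Nat.lor_assoc]; exact ih a (b ||| f s)
    · simp only [List.foldl_cons, if_neg h]; exact ih a b

theorem getD_set_ne' (c : List Nat) (j k : Nat) (w : Nat) (h : k ≠ j) :
    (c.set j w).getD k 0 = c.getD k 0 := by
  rw [List.getD_eq_getElem?_getD, List.getD_eq_getElem?_getD, List.getElem?_set_ne (Ne.symm h)]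

theorem getD_set_self' (c : List Nat) (j : Nat) (w : Nat) (h : j < c.length) :
    (c.set j w).getD j 0 = w := by
  rw [List.getD_eq_getElem?_getD, List.getElem?_set_self h]; rfl

theorem rowBN_set (P : Int → Prop) [DecidablePred P] (c : List Nat) (hc : c.length = 8)
    (j : Int) (h0 : 0 ≤ j) (h7 : j ≤ 7) (v : Nat) :
    rowBN P (c.set j.toNat (c.getD j.toNat 0 ||| v)) = rowBN P c ||| (if P j then v else 0) := by
  obtain ⟨hsplit, hpre, hpost⟩ :
      PySem.List.pyRange 0 8 1 = PySem.List.pyRange 0 j 1 ++ j :: PySem.List.pyRange (j+1) 8 1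
      ∧ (∀ s ∈ PySem.List.pyRange 0 j 1, s.toNat ≠ j.toNat)
      ∧ (∀ s ∈ PySem.List.pyRange (j+1) 8 1, s.toNat ≠ j.toNat) := by
    interval_cases j <;> exact ⟨by decide, by decide, by decide⟩
  have hlen : j.toNat < c.length := by rw [hc]; omega
  unfold rowBN
  rw [hsplit, List.foldl_append, List.foldl_append, List.foldl_cons, List.foldl_cons]
  have hpre_eq :
      (PySem.List.pyRange 0 j 1).foldl
          (fun d s => if P s then d ||| (c.set j.toNat (c.getD j.toNat 0 ||| v)).getD s.toNat 0 else d) 0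
        = (PySem.List.pyRange 0 j 1).foldl (fun d s => if P s then d ||| c.getD s.toNat 0 else d) 0 :=
    PySem.List.foldl_congr_mem _ _ _ _ (by
      intro acc s hs
      rw [getD_set_ne' c j.toNat s.toNat _ (hpre s hs)])
  rw [hpre_eq]
  set X0 : Nat := (PySem.List.pyRange 0 j 1).foldl (fun d s => if P s then d ||| c.getD s.toNat 0 else d) 0 with hX0
  have hpost_eq : ∀ (i : Nat),
      (PySem.List.pyRange (j+1) 8 1).foldl
          (fun d s => if P s then d ||| (c.set j.toNat (c.getD j.toNat 0 ||| v)).getD s.toNat 0 else d) i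
        = (PySem.List.pyRange (j+1) 8 1).foldl (fun d s => if P s then d ||| c.getD s.toNat 0 else d) i := by
    intro i
    exact PySem.List.foldl_congr_mem _ _ _ _ (by
      intro acc s hs
      rw [getD_set_ne' c j.toNat s.toNat _ (hpost s hs)])
  rw [hpost_eq]
  have hj : (c.set j.toNat (c.getD j.toNat 0 ||| v)).getD j.toNat 0 = c.getD j.toNat 0 ||| v :=
    getD_set_self' c j.toNat _ hlen
  rw [hj]
  by_cases hP : P j
  · simp only [if_pos hP]
    rw [show X0 ||| (c.getD j.toNat 0 ||| v) = v ||| (X0 ||| c.getD j.toNat 0) from by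
      rw [← Nat.lor_assoc, Nat.lor_comm]]
    rw [foldl_lor_pull, Nat.lor_comm]
  · simp only [if_neg hP, Nat.or_zero]

theorem srcIdx_le (dest x : Int) : srcIdx dest x ≤ 7 := min_le_left 7 _

theorem rowBN_build (P : Int → Prop) [DecidablePred P] (dest : Int) :
    ∀ (xs : List Int) (c : List Nat), c.length = 8 → (∀ x ∈ xs, 0 ≤ srcIdx dest x) →
      rowBN P (buildN dest c xs) = rowBN P c ||| rowAN P dest xs 0 := by
  intro xs
  induction xs with
  | nil => intro c hc _; simp [buildN, rowAN]
  | cons x t ih =>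
    intro c hc hs
    have h0 : 0 ≤ srcIdx dest x := hs x (List.mem_cons_self)
    have h7 : srcIdx dest x ≤ 7 := srcIdx_le dest x
    have hstep : rowAN P dest (x :: t) 0
        = (if P (srcIdx dest x) then maskN x else 0) ||| rowAN P dest t 0 := by
      unfold rowAN
      rw [List.foldl_cons]
      by_cases hP : P (srcIdx dest x)
      · rw [if_pos hP, if_pos hP, Nat.zero_or]
        have h := foldl_lor_pull (fun z => P (srcIdx dest z)) maskN t (maskN x) 0
        rw [Nat.or_zero] at h
        exact h
      · rw [if_neg hP, if_neg hP, Nat.zero_or]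
    have hset := rowBN_set P c hc (srcIdx dest x) h0 h7 (maskN x)
    calc rowBN P (buildN dest c (x :: t))
        = rowBN P (buildN dest (c.set (srcIdx dest x).toNat
            (c.getD (srcIdx dest x).toNat 0 ||| maskN x)) t) := rfl
      _ = rowBN P (c.set (srcIdx dest x).toNat (c.getD (srcIdx dest x).toNat 0 ||| maskN x))
            ||| rowAN P dest t 0 := by
          exact ih _ (by rw [List.length_set, hc]) (fun z hz => hs z (List.mem_cons_of_mem _ hz))
      _ = (rowBN P c ||| (if P (srcIdx dest x) then maskN x else 0)) ||| rowAN P dest t 0 := by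
          rw [hset]
      _ = rowBN P c ||| rowAN P dest (x :: t) 0 := by
          rw [hstep, Nat.lor_assoc]

theorem rowBN_replicate_zero (P : Int → Prop) [DecidablePred P] :
    rowBN P (List.replicate 8 0) = 0 := by
  unfold rowBN
  have : ∀ (l : List Int) (a : Nat),
      l.foldl (fun d s => if P s then d ||| (List.replicate 8 (0:Nat)).getD s.toNat 0 else d) a = a := by
    intro l
    induction l with
    | nil => intro a; rfl
    | cons s t ih =>
      intro a
      rw [List.foldl_cons, getD_replicate_zero]
      by_cases hP : P s
      · rw [if_pos hP, Nat.or_zero]; exact ih a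
      · rw [if_neg hP]; exact ih a
  exact this _ 0

-- Int → Nat bridges (every accumulator/mask is a cast of a Nat)
theorem bridgeA (P : Int → Prop) [DecidablePred P] (dest : Int) :
    ∀ (xs : List Int) (a : Nat),
      xs.foldl (fun d x => if P (srcIdx dest x) then PySem.Int.bor d ((1 : Int) <<< (15 - x).toNat) else d) ((a : Nat) : Int)
        = ((rowAN P dest xs a : Nat) : Int) := by
  intro xs
  induction xs with
  | nil => intro a; rfl
  | cons x t ih =>
    intro a
    unfold rowAN
    rw [List.foldl_cons, List.foldl_cons]
    by_cases hP : P (srcIdx dest x)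
    · rw [if_pos hP, if_pos hP, one_shiftLeft_cast, PySem.Int.bor_natCast]
      exact ih (a ||| maskN x)
    · rw [if_neg hP, if_neg hP]; exact ih a

theorem bridgeB (P : Int → Prop) [DecidablePred P] (cN : List Nat) :
    ∀ (l : List Int) (a : Nat),
      l.foldl (fun d s => if P s then PySem.Int.bor d ((castL cN).getD s.toNat 0) else d) ((a : Nat) : Int)
        = ((l.foldl (fun d s => if P s then d ||| cN.getD s.toNat 0 else d) a : Nat) : Int) := by
  intro l
  induction l with
  | nil => intro a; rfl
  | cons s t ih =>
    intro a
    rw [List.foldl_cons, List.foldl_cons]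
    by_cases hP : P s
    · rw [if_pos hP, if_pos hP, getD_castL, PySem.Int.bor_natCast]
      exact ih (a ||| cN.getD s.toNat 0)
    · rw [if_neg hP, if_neg hP]; exact ih a

theorem bridgeC (dest : Int) :
    ∀ (xs : List Int) (cN : List Nat),
      xs.foldl (fun c x => c.set (srcIdx dest x).toNat
          (PySem.Int.bor (c.getD (srcIdx dest x).toNat 0) ((1 : Int) <<< (15 - x).toNat)))
        (castL cN)
        = castL (buildN dest cN xs) := by
  intro xs
  induction xs with
  | nil => intro cN; rfl
  | cons x t ih =>
    intro cN
    unfold buildN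
    rw [List.foldl_cons, List.foldl_cons, getD_castL, one_shiftLeft_cast,
      PySem.Int.bor_natCast, set_castL]
    exact ih _

theorem castL_replicate_zero : List.replicate 8 (0 : Int) = castL (List.replicate 8 0) := by
  rw [castL, List.map_replicate]; rfl

theorem srcIdx_nonneg (dest x : Int) (hd : 0 < dest) (hx : 0 ≤ x) : 0 ≤ srcIdx dest x := by
  unfold srcIdx
  rw [PySem.Int.floordiv_eq_ediv_of_pos hd]
  exact le_min (by norm_num) (Int.ediv_nonneg (by omega) hd.le)

theorem row_eq (src dest : Int) (hd : 0 < dest) :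
    (PySem.List.pyRange 0 dest 1).foldl (fun d x =>
        if PySem.Int.band (pyShr src (7 - srcIdx dest x).toNat) 1 ≠ 0 then
          PySem.Int.bor d ((1 : Int) <<< (15 - x).toNat)
        else d) 0
    = (PySem.List.pyRange 0 8 1).foldl (fun d s =>
        if PySem.Int.band (pyShr src (7 - s).toNat) 1 ≠ 0 then
          PySem.Int.bor d
            (((PySem.List.pyRange 0 dest 1).foldl (fun c x =>
                c.set (srcIdx dest x).toNat
                  (PySem.Int.bor (c.getD (srcIdx dest x).toNat 0) ((1 : Int) <<< (15 - x).toNat)))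
              (List.replicate 8 0)).getD s.toNat 0)
        else d) 0 := by
  set P : Int → Prop := fun s => PySem.Int.band (pyShr src (7 - s).toNat) 1 ≠ 0 with hP
  have hs : ∀ x ∈ PySem.List.pyRange 0 dest 1, 0 ≤ srcIdx dest x := by
    intro x hx
    exact srcIdx_nonneg dest x hd (PySem.List.mem_pyRange_one.mp hx).1
  calc (PySem.List.pyRange 0 dest 1).foldl (fun d x =>
          if P (srcIdx dest x) then PySem.Int.bor d ((1 : Int) <<< (15 - x).toNat) else d) 0
      = ((rowAN P dest (PySem.List.pyRange 0 dest 1) 0 : Nat) : Int) := bridgeA P dest _ 0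
    _ = ((rowBN P (buildN dest (List.replicate 8 0) (PySem.List.pyRange 0 dest 1)) : Nat) : Int) := by
        rw [rowBN_build P dest _ _ (by simp) hs, rowBN_replicate_zero, Nat.zero_or]
    _ = (PySem.List.pyRange 0 8 1).foldl (fun d s =>
          if P s then
            PySem.Int.bor d
              ((castL (buildN dest (List.replicate 8 0) (PySem.List.pyRange 0 dest 1))).getD s.toNat 0)
          else d) 0 := (bridgeB P (buildN dest (List.replicate 8 0) (PySem.List.pyRange 0 dest 1)) (PySem.List.pyRange 0 8 1) 0).symm
    _ = _ := by rw [← bridgeC dest _ _, ← castL_replicate_zero]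

-- ===== VERDICT (by name: the statement is the Claim_ definition above) =====
theorem upscale_glyph_spec : Claim_equal_upscale_glyph := by
  intro rows8 dest _ _
  unfold Spec_upscale_glyph upscale_glyph upscale_glyph_alt
  refine PySem.List.foldl_congr_mem _ _ _ _ ?_
  intro acc y hy
  have hd : 0 < dest := by
    have h1 := (PySem.List.mem_pyRange_one.mp hy).2
    have h2 := (PySem.List.mem_pyRange_one.mp hy).1
    omega
  exact congrArg (fun r => acc ++ [r]) (row_eq ((PySem.List.pyGet? rows8 (srcIdx dest y)).getD 0) dest hd)
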